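-- pv_equiv track=rewrite | github.com/rlacombe/distillate | distillate/experiments.py | _factorize_hyperparams
-- ===== SOURCE A (Python) =====
-- def _factorize_hyperparams(runs: list[dict]) -> tuple[dict, set]:
--     """Find hyperparameters that are identical across all runs that have them.
--
--     Returns (common_params, varying_keys).  A param is "common" if every run
--     that defines it uses the same value and at least 2 runs define it.
--     """
--     # Collect all values per key
--     key_values: dict[str, list] = {}
--     key_counts: dict[str, int] = {}
--     for run in runs:
--         for k, v in run.get("hyperparameters", {}).items():
--             key_values.setdefault(k, []).append(v)
--             key_counts[k] = key_counts.get(k, 0) + 1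
--
--     common: dict = {}
--     varying: set = set()
--     for k, vals in key_values.items():
--         if key_counts[k] >= 2 and len(set(str(v) for v in vals)) == 1:
--             common[k] = vals[0]
--         else:
--             varying.add(k)
--
--     return common, varying
-- ===== SOURCE B (Python) =====
-- def _factorize_hyperparams(runs: list[dict]) -> tuple[dict, set]:
--     """Find hyperparameters identical across all runs that define them.
--
--     Brute-force per-key rescan: flatten all (key, value) pairs, list the
--     distinct keys in first-appearance order, then for each key scan the
--     flat pair list computing its count, first value and all-equal flag.
--     No per-key aggregation dict is ever built.
--     """
--     pairs = [(k, v) for run in runs for k, v in run.get("hyperparameters", {}).items()]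
--     keys: list = []
--     for k, _ in pairs:
--         if k not in keys:
--             keys.append(k)
--     common: dict = {}
--     varying: set = set()
--     for k in keys:
--         count = 0
--         first = None
--         all_equal = True
--         for kk, v in pairs:
--             if kk == k:
--                 if count == 0:
--                     first = v
--                 elif str(v) != str(first):
--                     all_equal = False
--                 count += 1
--         if count >= 2 and all_equal:
--             common[k] = first
--         else:
--             varying.add(k)
--     return common, varying
-- ===== Notes on version B (the rewrite author's own statement) =====
-- stated objective: alternative
-- what changed: B drops A's per-key aggregation dicts entirely: it flattens all (key,value) pairs, lists the distinct keys in first-appearance order, then for each key rescans the flat pair list computing count, first value and a running all-equal flag, instead of A's single pass building dicts of value-lists and counts followed by a per-key set() dedup.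
import Mathlib
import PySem

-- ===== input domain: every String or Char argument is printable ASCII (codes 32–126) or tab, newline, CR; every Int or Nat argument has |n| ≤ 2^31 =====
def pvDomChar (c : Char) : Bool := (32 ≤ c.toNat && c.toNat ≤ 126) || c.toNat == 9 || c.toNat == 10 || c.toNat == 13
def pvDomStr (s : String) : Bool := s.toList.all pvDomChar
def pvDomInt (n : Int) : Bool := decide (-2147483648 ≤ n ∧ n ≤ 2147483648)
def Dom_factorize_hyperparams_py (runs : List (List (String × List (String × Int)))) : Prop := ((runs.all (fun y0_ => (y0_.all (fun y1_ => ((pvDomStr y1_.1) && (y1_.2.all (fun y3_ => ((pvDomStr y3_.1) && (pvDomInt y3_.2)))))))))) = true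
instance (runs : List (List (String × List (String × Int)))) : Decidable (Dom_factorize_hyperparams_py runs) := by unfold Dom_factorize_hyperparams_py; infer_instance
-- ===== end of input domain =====

-- B replaces A's single-pass dict aggregation (value-lists + counts, then a per-key set() dedup)
-- by a brute-force per-key rescan of the flattened (key, value) pair list (objective: alternative, not faster).

-- ===== PORT A =====
-- run.get("hyperparameters", {}).items() — shared by both ports (same source expression in both Pythons)
def pvItems (run : List (String × List (String × Int))) : List (String × Int) :=
  (PySem.Dict.ofList ((PySem.Dict.ofList run).getD "hyperparameters" [])).items

-- body of A's collection loop: key_values.setdefault(k, []).append(v); key_counts[k] = key_counts.get(k, 0) + 1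
def pvAStep (st : PySem.Dict String (List Int) × PySem.Dict String Int) (p : String × Int) :
    PySem.Dict String (List Int) × PySem.Dict String Int :=
  (st.1.modify p.1 [] (fun vs => vs ++ [p.2]), st.2.modify p.1 0 (fun c => c + 1))

def factorize_hyperparams_py (runs : List (List (String × List (String × Int)))) : (List (String × Int)) × List String :=
  let st := runs.foldl (fun st run => (pvItems run).foldl pvAStep st) (PySem.Dict.empty, PySem.Dict.empty)
  -- key_counts[k] never raises (k is a key of both dicts), so the total getD is exact here;
  -- vals[0] is reached only on nonempty vals, so headD is exact here
  let res := st.1.items.foldl (fun acc e =>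
      if decide (2 ≤ st.2.getD e.1 0) && (PySem.Set.len (PySem.Set.ofList (e.2.map PySem.Int.toStr)) == 1)
      then (acc.1.insert e.1 (e.2.headD 0), acc.2)
      else (acc.1, PySem.Set.add acc.2 e.1))
    ((PySem.Dict.empty : PySem.Dict String Int), (PySem.Set.empty : PySem.Set String))
  (res.1.items, res.2)

-- ===== PORT B =====
-- body of B's inner rescan for key k over the flat pair list, state (count, first, all_equal);
-- first.getD 0 is read only in the elif branch, where count ≠ 0 guarantees first is some
def pvScanStep (k : String) (st : Int × Option Int × Bool) (q : String × Int) : Int × Option Int × Bool :=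
  if q.1 == k then
    if st.1 == 0 then (st.1 + 1, some q.2, st.2.2)
    else (st.1 + 1, st.2.1,
          if PySem.Int.toStr q.2 != PySem.Int.toStr (st.2.1.getD 0) then false else st.2.2)
  else st

def factorize_hyperparams_py_alt (runs : List (List (String × List (String × Int)))) : (List (String × Int)) × List String :=
  let pairs := runs.flatMap pvItems
  let keys := pairs.foldl (fun ks (p : String × Int) => if ks.contains p.1 then ks else ks ++ [p.1]) ([] : List String)
  let res := keys.foldl (fun acc k =>
      let st := pairs.foldl (pvScanStep k) ((0 : Int), (none : Option Int), true)
      if decide (2 ≤ st.1) && st.2.2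
      then (acc.1.insert k (st.2.1.getD 0), acc.2)
      else (acc.1, PySem.Set.add acc.2 k))
    ((PySem.Dict.empty : PySem.Dict String Int), (PySem.Set.empty : PySem.Set String))
  (res.1.items, res.2)

-- ===== PRECONDITION & SPEC =====
def Spec_factorize_hyperparams_py (runs : List (List (String × List (String × Int)))) (out : (List (String × Int)) × List String) : Prop := out = factorize_hyperparams_py_alt runs
instance (runs : List (List (String × List (String × Int)))) (out : (List (String × Int)) × List String) : Decidable (Spec_factorize_hyperparams_py runs out) := by unfold Spec_factorize_hyperparams_py; infer_instance

-- ===== CLAIM (what is proved, stated in full; the proofs are below) =====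
def Claim_equal_factorize_hyperparams_py : Prop := ∀ (runs : List (List (String × List (String × Int)))), Dom_factorize_hyperparams_py runs → Spec_factorize_hyperparams_py runs (factorize_hyperparams_py runs)

-- ===== LEMMAS AND PROOFS =====

-- the values A collects for key k, from the flattened pair list
def pvVals (L : List (String × Int)) (k : String) : List Int :=
  (L.filter (fun q => q.1 == k)).map Prod.snd

-- B's all_equal flag as a function of the collected values
def pvAeq (vs : List Int) : Bool :=
  match vs with
  | [] => true
  | h :: t => t.all (fun v => PySem.Int.toStr v == PySem.Int.toStr h)

-- a nested loop over runs is the flat loop over the flattened pair list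
lemma pv_flat {σ : Type} (f : σ → String × Int → σ) (runs : List (List ( String × List (String × Int)))) :
    ∀ st : σ, runs.foldl (fun st run => (pvItems run).foldl f st) st = (runs.flatMap pvItems).foldl f st := by
  induction runs with
  | nil => intro st; rfl
  | cons r t ih => intro st; simp [List.foldl_append, ih]

-- B's inner rescan computes (length, head?, all-equal flag) of the values of k
lemma pv_scan (k : String) : ∀ (L : List (String × Int)) (vs : List Int),
    L.foldl (pvScanStep k) (((vs.length : Int), vs.head?, pvAeq vs))
      = (((vs ++ pvVals L k).length : Int), (vs ++ pvVals L k).head?, pvAeq (vs ++ pvVals L k)) := by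
  intro L
  induction L with
  | nil => intro vs; simp [pvVals]
  | cons q t ih =>
      intro vs
      by_cases hq : q.1 = k
      · have hstep : pvScanStep k (((vs.length : Int), vs.head?, pvAeq vs)) q
            = ((((vs ++ [q.2]).length : Int), (vs ++ [q.2]).head?, pvAeq (vs ++ [q.2]))) := by
          cases vs with
          | nil => simp [pvScanStep, hq, pvAeq]
          | cons h t0 =>
              have hne : (((h :: t0).length : Int) == 0) = false := by
                simp
                omega
              simp only [pvScanStep, hq, beq_self_eq_true, if_true, hne, Bool.false_eq_true, if_false]
              simp [pvAeq, List.all_append]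
              by_cases hc : PySem.Int.toStr q.2 = PySem.Int.toStr h
              · simp [hc]
              · simp [hc]
        have hvals : pvVals (q :: t) k = q.2 :: pvVals t k := by
          simp [pvVals, hq]
        rw [List.foldl_cons, hstep, ih (vs ++ [q.2]), hvals]
        simp
      · have hvals : pvVals (q :: t) k = pvVals t k := by
          simp [pvVals, hq]
        have hstep : pvScanStep k (((vs.length : Int), vs.head?, pvAeq vs)) q
            = (((vs.length : Int), vs.head?, pvAeq vs)) := by
          simp [pvScanStep, hq]
        rw [List.foldl_cons, hstep, ih vs, hvals]

-- A's set()-dedup test equals B's running all-equal flag on nonempty values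
lemma pv_foldl_add_len_le {α : Type} [BEq α] (l : List α) :
    ∀ s : PySem.Set α, s.length ≤ (l.foldl PySem.Set.add s).length := by
  induction l with
  | nil => intro s; exact le_refl _
  | cons a t ih =>
      intro s
      refine le_trans ?_ (ih (PySem.Set.add s a))
      simp only [PySem.Set.add]
      split
      · exact le_rfl
      · simp

lemma pv_foldl_add_singleton (s : String) (l : List String) :
    (l.foldl PySem.Set.add [s]).length = 1 ↔ ∀ y ∈ l, y = s := by
  induction l with
  | nil => simp
  | cons a t ih =>
      by_cases ha : a = s
      · subst ha
        have hadd : PySem.Set.add [a] a = [a] := by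
          simp [PySem.Set.add, PySem.Set.contains]
        simp only [List.foldl_cons, hadd, ih, List.mem_cons]
        constructor
        · intro hall y hy; rcases hy with rfl | hy
          · rfl
          · exact hall y hy
        · intro hall y hy; exact hall y (Or.inr hy)
      · have hadd : PySem.Set.add [s] a = [s, a] := by
          simp [PySem.Set.add, PySem.Set.contains, ha]
        have h2 : 2 ≤ (t.foldl PySem.Set.add [s, a]).length := by
          simpa using pv_foldl_add_len_le t [s, a]
        simp only [List.foldl_cons, hadd]
        constructor
        · intro hl; omega
        · intro hall; exact absurd (hall a (by simp)) ha

lemma pv_setlen_one (vs : List Int) (h : vs ≠ []) :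
    (PySem.Set.len (PySem.Set.ofList (vs.map PySem.Int.toStr)) == 1) = pvAeq vs := by
  cases vs with
  | nil => exact absurd rfl h
  | cons a t =>
    rw [Bool.eq_iff_iff]
    have hadd : PySem.Set.add ([] : PySem.Set String) (PySem.Int.toStr a) = [PySem.Int.toStr a] := by
      simp [PySem.Set.add, PySem.Set.contains]
    simp only [PySem.Set.len, PySem.Set.ofList_eq_foldl, List.map_cons, List.foldl_cons, hadd,
      beq_iff_eq, pvAeq, List.all_eq_true]
    rw [show ((1 : Int)) = ((1 : Nat) : Int) from rfl, Int.natCast_inj]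
    rw [pv_foldl_add_singleton]
    constructor
    · intro hall x hx
      simpa using hall _ (List.mem_map.mpr ⟨x, hx, rfl⟩)
    · intro hall y hy
      obtain ⟨x, hx, rfl⟩ := List.mem_map.mp hy
      simpa using hall x hx

-- the two ports agree
lemma pv_main (runs : List (List (String × List (String × Int)))) :
    factorize_hyperparams_py runs = factorize_hyperparams_py_alt runs := by
  unfold factorize_hyperparams_py factorize_hyperparams_py_alt
  rw [pv_flat pvAStep runs]
  set L := runs.flatMap pvItems with hLdef
  have hsplit : L.foldl pvAStep (PySem.Dict.empty, PySem.Dict.empty)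
      = (L.foldl (fun (d : PySem.Dict String (List Int)) (p : String × Int) => d.modify p.1 [] (fun vs => vs ++ [p.2])) PySem.Dict.empty,
         L.foldl (fun (d : PySem.Dict String Int) (p : String × Int) => d.modify p.1 0 (fun c => c + 1)) PySem.Dict.empty) :=
    PySem.List.foldl_prod_mk
      (fun (d : PySem.Dict String (List Int)) (p : String × Int) => d.modify p.1 [] (fun vs => vs ++ [p.2]))
      (fun (d : PySem.Dict String Int) (p : String × Int) => d.modify p.1 0 (fun c => c + 1)) L _ _
  rw [hsplit]
  dsimp only
  set kv := L.foldl (fun (d : PySem.Dict String (List Int)) (p : String × Int) => d.modify p.1 [] (fun vs => vs ++ [p.2])) PySem.Dict.empty with hkv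
  set kc := L.foldl (fun (d : PySem.Dict String Int) (p : String × Int) => d.modify p.1 0 (fun c => c + 1)) PySem.Dict.empty with hkc
  have hnd : kv.keys.Nodup := by
    rw [hkv]; apply PySem.Dict.nodup_keys_foldl_modify_key; simp
  have hkeysA : kv.keys = PySem.Set.ofList (L.map Prod.fst) := by
    rw [hkv, PySem.Dict.keys_foldl_modify_key]
    simp [PySem.Set.update_nil_left]
  have hitems : kv.items = kv.keys.map (fun k => (k, kv.getD k [])) :=
    PySem.Dict.items_eq_map_keys kv hnd []
  have hvals : ∀ k, kv.getD k [] = pvVals L k := by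
    intro k
    rw [hkv, PySem.Dict.getD_foldl_modify_append]
    simp [pvVals]
  have hcnt : ∀ k, kc.getD k 0 = ((pvVals L k).length : Int) := by
    intro k
    have hm : (L.map Prod.fst).foldl (fun (d : PySem.Dict String Int) (x : String) => d.modify x 0 (fun c => c + 1)) PySem.Dict.empty
        = L.foldl (fun (d : PySem.Dict String Int) (p : String × Int) => d.modify p.1 0 (fun c => c + 1)) PySem.Dict.empty :=
      List.foldl_map (f := Prod.fst) (g := fun (d : PySem.Dict String Int) (x : String) => d.modify x 0 (fun c => c + 1))
    rw [hkc, ← hm, PySem.Dict.getD_foldl_modify_add_one]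
    simp only [pvVals, List.length_map]
    rw [List.count_eq_countP, List.countP_map, ← List.countP_eq_length_filter]
    simp [PySem.Dict.getD_empty]
    exact List.countP_congr (by intro a _; rfl)
  have hkeysB : L.foldl (fun ks (p : String × Int) => if ks.contains p.1 then ks else ks ++ [p.1]) ([] : List String)
      = PySem.Set.ofList (L.map Prod.fst) := by
    have hfn : (fun (ks : List String) (p : String × Int) => if ks.contains p.1 then ks else ks ++ [p.1])
        = (fun ks p => PySem.Set.add ks p.1) := by
      funext ks p; simp [PySem.Set.add, PySem.Set.contains]
    rw [hfn, ← PySem.Set.update_map_eq_foldl_add, PySem.Set.update_nil_left]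
  have hsc : ∀ k, L.foldl (pvScanStep k) ((0 : Int), (none : Option Int), true)
      = (((pvVals L k).length : Int), (pvVals L k).head?, pvAeq (pvVals L k)) := by
    intro k
    simpa [pvAeq] using pv_scan k L []
  rw [hitems, hkeysA, hkeysB, List.foldl_map]
  simp only [hsc]
  refine congrArg (fun r : PySem.Dict String Int × PySem.Set String => (r.1.items, r.2)) ?_
  apply PySem.List.foldl_congr_mem
  intro acc k _
  rw [hvals, hcnt]
  cases hv : pvVals L k with
  | nil => simp
  | cons h t =>
      rw [pv_setlen_one _ (by simp)]
      simp [List.headD]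

-- ===== VERDICT (by name: the statement is the Claim_ definition above) =====
theorem factorize_hyperparams_py_spec : Claim_equal_factorize_hyperparams_py := by
  intro runs _
  exact pv_main runs
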